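-- pv_equiv track=rewrite | github.com/pypi-data/pypi-mirror-403 | packages/hla-compass/hla_compass-2.0.11.tar.gz/hla_compass-2.0.11/hla_compass/database/security.py | _has_unbalanced_quotes
-- ===== SOURCE A (Python) =====
-- def _has_unbalanced_quotes(sql: str) -> bool:
--     """Check if the query has unbalanced quotes."""
--     single_quotes = 0
--     double_quotes = 0
--     i = 0
--
--     while i < len(sql):
--         if sql[i] == "'":
--             # Check for escaped quote
--             if i + 1 < len(sql) and sql[i + 1] == "'":
--                 i += 1  # Skip escaped quote
--             else:
--                 single_quotes += 1
--         elif sql[i] == '"':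
--             # Check for escaped quote
--             if i + 1 < len(sql) and sql[i + 1] == '"':
--                 i += 1  # Skip escaped quote
--             else:
--                 double_quotes += 1
--         i += 1
--
--     # Both quote counts should be even (pairs)
--     return (single_quotes % 2 != 0) or (double_quotes % 2 != 0)
-- ===== SOURCE B (Python) =====
-- def _has_unbalanced_quotes(sql: str) -> bool:
--     """Check if the query has unbalanced quotes."""
--     # Escaped ('' / "") quotes are consumed two at a time, so they never
--     # change the parity of the raw quote counts: oddness of the totals is
--     # exactly what A's state machine computes.
--     return sql.count("'") % 2 == 1 or sql.count('"') % 2 == 1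
-- ===== Notes on version B (the rewrite author's own statement) =====
-- stated objective: simpler
-- what changed: Replaced the index-walking state machine with escape-skipping by two str.count calls and a parity test; skipped escaped quote pairs always consume two quote characters, so they never change the parity of either total count.
import Mathlib
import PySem

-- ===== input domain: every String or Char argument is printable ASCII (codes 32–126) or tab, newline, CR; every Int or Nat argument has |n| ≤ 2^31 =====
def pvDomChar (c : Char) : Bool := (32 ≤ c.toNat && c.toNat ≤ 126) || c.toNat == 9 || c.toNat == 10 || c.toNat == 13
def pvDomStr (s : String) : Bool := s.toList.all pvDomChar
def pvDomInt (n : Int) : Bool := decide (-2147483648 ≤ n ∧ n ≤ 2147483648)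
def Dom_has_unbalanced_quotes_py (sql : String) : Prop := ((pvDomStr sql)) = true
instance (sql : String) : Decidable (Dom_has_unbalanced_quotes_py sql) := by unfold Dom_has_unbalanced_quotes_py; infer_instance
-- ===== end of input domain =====

-- B replaces A's escape-skipping index walk by two str.count calls with a parity test (simpler, same O(n)).

-- ===== PORT A =====
-- The while loop over index i becomes structural recursion over the remaining characters;
-- 'sql[i+1]' is the head of the rest of the list, 'i += 1' the extra drop.
def pvLoopA : List Char → Nat → Nat → Nat × Nat
  | [], s, d => (s, d)
  | [c], s, d =>
    if c = '\'' then pvLoopA [] (s + 1) d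
    else if c = '"' then pvLoopA [] s (d + 1)
    else pvLoopA [] s d
  | c :: c2 :: rest, s, d =>
    if c = '\'' then
      if c2 = '\'' then pvLoopA rest s d else pvLoopA (c2 :: rest) (s + 1) d
    else if c = '"' then
      if c2 = '"' then pvLoopA rest s d else pvLoopA (c2 :: rest) s (d + 1)
    else
      pvLoopA (c2 :: rest) s d

def has_unbalanced_quotes_py (sql : String) : Bool :=
  let r := pvLoopA sql.toList 0 0
  decide (r.1 % 2 ≠ 0) || decide (r.2 % 2 ≠ 0)

-- ===== PORT B =====
def has_unbalanced_quotes_py_alt (sql : String) : Bool :=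
  (PySem.Str.count sql "'" % 2 == 1) || (PySem.Str.count sql "\"" % 2 == 1)

-- ===== PRECONDITION & SPEC =====
def Spec_has_unbalanced_quotes_py (sql : String) (out : Bool) : Prop := out = has_unbalanced_quotes_py_alt sql
instance (sql : String) (out : Bool) : Decidable (Spec_has_unbalanced_quotes_py sql out) := by unfold Spec_has_unbalanced_quotes_py; infer_instance

-- ===== CLAIM (what is proved, stated in full; the proofs are below) =====
def Claim_equal_has_unbalanced_quotes_py : Prop := ∀ (sql : String), Dom_has_unbalanced_quotes_py sql → Spec_has_unbalanced_quotes_py sql (has_unbalanced_quotes_py sql)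

-- ===== LEMMAS AND PROOFS =====

-- A's loop preserves the parity of (accumulator + raw count of quotes in the rest):
-- the escape-skip branch drops two quote characters at once.
theorem pvLoopA_parity (cs : List Char) (s d : Nat) :
    (pvLoopA cs s d).1 % 2 = (s + cs.count '\'') % 2 ∧
    (pvLoopA cs s d).2 % 2 = (d + cs.count '"') % 2 := by
  fun_induction pvLoopA cs s d <;>
    simp_all [pvLoopA, List.count_cons] <;> omega

-- PySem substring count with a single-character needle is List.count.
theorem pvCountGo_single (v : Char) : ∀ (cs : List Char) (n acc : Nat), cs.length ≤ n →
    PySem.Chars.count.go [v] n cs acc = acc + cs.count v := by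
  intro cs
  induction cs with
  | nil => intro n acc h; unfold PySem.Chars.count.go; cases n <;> simp
  | cons c rest ih =>
    intro n acc h
    cases n with
    | zero => simp at h
    | succ m =>
      unfold PySem.Chars.count.go
      simp only [List.isPrefixOf, List.length] at *
      by_cases hc : v = c
      · subst hc
        simp [ih m (acc + 1) (by omega)]
        omega
      · have hb : (v == c) = false := by simp [hc]
        simp [hb, ih m acc (by omega), Ne.symm hc]

theorem pvCount_single (v : Char) (cs : List Char) : PySem.Chars.count cs [v] = cs.count v := by
  simp [PySem.Chars.count, pvCountGo_single v cs cs.length 0 le_rfl]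

-- ===== VERDICT (by name: the statement is the Claim_ definition above) =====
theorem has_unbalanced_quotes_py_spec : Claim_equal_has_unbalanced_quotes_py := by
  intro sql _
  unfold Spec_has_unbalanced_quotes_py has_unbalanced_quotes_py has_unbalanced_quotes_py_alt
  have h := pvLoopA_parity sql.toList 0 0
  have h1 : PySem.Str.count sql "'" = sql.toList.count '\'' := by
    simp [PySem.Str.count_eq]
    exact pvCount_single '\'' sql.toList
  have h2 : PySem.Str.count sql "\"" = sql.toList.count '"' := by
    simp [PySem.Str.count_eq]
    exact pvCount_single '"' sql.toList
  simp only [h1, h2]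
  have e1 := h.1
  have e2 := h.2
  simp only [Nat.zero_add] at e1 e2
  rcases Nat.mod_two_eq_zero_or_one (pvLoopA sql.toList 0 0).1 with hs | hs <;>
  rcases Nat.mod_two_eq_zero_or_one (pvLoopA sql.toList 0 0).2 with hd | hd <;>
    simp [hs, hd, ← e1, ← e2]
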